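-- pv_equiv track=rewrite | github.com/Yosshi999/ARCGolfVisualizer | outputs/task058/5575_fromdsl.py | hupscale
-- ===== SOURCE A (Python) =====
-- def hupscale(grid, factor):
--     g = tuple()
--     for row in grid:
--         r = tuple()
--         for value in row:
--             r = r + tuple((value for num in range(factor)))
--         g = g + (r,)
--     return g
-- ===== SOURCE B (Python) =====
-- def hupscale(grid, factor):
--     return tuple(
--         tuple(row[j // factor] for j in range(len(row) * factor))
--         for row in grid
--     )
-- ===== Notes on version B (the rewrite author's own statement) =====
-- stated objective: alternative
-- what changed: B maps each destination column index j back to its source cell row[j // factor] over range(len(row)*factor) and assembles rows with comprehensions, instead of A's accumulator loops that emit factor copies of each source value via repeated tuple concatenation.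
import Mathlib
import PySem

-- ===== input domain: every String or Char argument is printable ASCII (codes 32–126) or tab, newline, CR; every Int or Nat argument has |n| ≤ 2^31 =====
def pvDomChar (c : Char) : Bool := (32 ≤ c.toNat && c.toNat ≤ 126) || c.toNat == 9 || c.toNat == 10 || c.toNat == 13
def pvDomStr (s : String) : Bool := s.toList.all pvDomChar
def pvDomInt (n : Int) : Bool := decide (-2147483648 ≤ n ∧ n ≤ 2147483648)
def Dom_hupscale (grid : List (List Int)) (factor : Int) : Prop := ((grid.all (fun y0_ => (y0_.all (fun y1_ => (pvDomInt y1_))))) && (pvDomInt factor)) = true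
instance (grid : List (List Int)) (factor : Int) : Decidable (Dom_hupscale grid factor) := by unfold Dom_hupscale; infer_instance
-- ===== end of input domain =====

-- B maps destination indices back to source cells (row[j // factor]) instead of
-- A's accumulator loops concatenating factor copies of each source value.

-- ===== PORT A =====
def hupscale (grid : List (List Int)) (factor : Int) : List (List Int) :=
  grid.foldl
    (fun g row =>
      g ++ [row.foldl
        (fun r value => r ++ (PySem.List.pyRange 0 factor 1).map (fun _ => value))
        []])
    []

-- ===== PORT B =====
-- row[j // factor] is always in range (0 ≤ j < len(row)*factor with factor > 0),
-- so the Python index is ported with pyGetD (default never used).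
def hupscale_alt (grid : List (List Int)) (factor : Int) : List (List Int) :=
  grid.map (fun row =>
    (PySem.List.pyRange 0 ((row.length : Int) * factor) 1).map
      (fun j => PySem.List.pyGetD row (PySem.Int.floordiv j factor) 0))

-- ===== PRECONDITION & SPEC =====
def Spec_hupscale (grid : List (List Int)) (factor : Int) (out : List (List Int)) : Prop := out = hupscale_alt grid factor
instance (grid : List (List Int)) (factor : Int) (out : List (List Int)) : Decidable (Spec_hupscale grid factor out) := by unfold Spec_hupscale; infer_instance

-- ===== CLAIM (what is proved, stated in full; the proofs are below) =====
def Claim_equal_hupscale : Prop := ∀ (grid : List (List Int)) (factor : Int), Dom_hupscale grid factor → Spec_hupscale grid factor (hupscale grid factor)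

-- ===== LEMMAS AND PROOFS =====

-- Nat-level core: reading back source cells by k / n equals repeating each cell n times.
lemma range_div_getD_eq_flatMap (row : List Int) (n : Nat) (hn : 0 < n) :
    (List.range (row.length * n)).map (fun k => row.getD (k / n) 0)
      = row.flatMap (fun v => List.replicate n v) := by
  induction row with
  | nil => simp
  | cons v rest ih =>
    have hlen : (v :: rest).length * n = n + rest.length * n := by
      simp [List.length_cons]; ring
    rw [hlen, List.range_add, List.map_append, List.map_map]
    congr 1
    · have : ∀ k ∈ List.range n, (v :: rest).getD (k / n) 0 = v := by
        intro k hk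
        rw [List.mem_range] at hk
        rw [Nat.div_eq_of_lt hk]
        rfl
      calc List.map (fun k => (v :: rest).getD (k / n) 0) (List.range n)
          = List.map (fun _ => v) (List.range n) := List.map_congr_left this
        _ = List.replicate n v := by simp [List.map_const']
    · rw [← List.flatMap_def, ← ih]
      apply List.map_congr_left
      intro k hk
      simp only [Function.comp]
      have : (n + k) / n = k / n + 1 := by
        rw [Nat.add_comm, Nat.add_div_right _ hn]
      rw [this]
      rfl

lemma rowA_eq_flatMap (row : List Int) (factor : Int) :
    row.foldl (fun r value => r ++ (PySem.List.pyRange 0 factor 1).map (fun _ => value)) []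
      = row.flatMap (fun v => List.replicate factor.toNat v) := by
  rw [PySem.List.foldl_append_eq_flatMap]
  simp only [List.nil_append]
  congr 1
  funext v
  rw [PySem.List.pyRange_one]
  rw [List.map_map]
  simp [Function.comp_def, List.map_const']

lemma rowB_eq_flatMap (row : List Int) (factor : Int) :
    (PySem.List.pyRange 0 ((row.length : Int) * factor) 1).map
      (fun j => PySem.List.pyGetD row (PySem.Int.floordiv j factor) 0)
      = row.flatMap (fun v => List.replicate factor.toNat v) := by
  rcases le_or_gt factor 0 with hf | hf
  · have h1 : ((row.length : Int) * factor) ≤ 0 :=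
      mul_nonpos_iff.mpr (Or.inl ⟨by positivity, hf⟩)
    rw [PySem.List.pyRange_one_eq_nil (by omega)]
    have : factor.toNat = 0 := by omega
    simp [this]
  · set n := factor.toNat with hn
    have hfn : factor = (n : Int) := by omega
    have hlen : (row.length : Int) * factor = ((row.length * n : Nat) : Int) := by
      rw [hfn]; push_cast; ring
    rw [hlen, PySem.List.pyRange_zero_natCast, List.map_map]
    rw [← range_div_getD_eq_flatMap row n (by omega)]
    apply List.map_congr_left
    intro k _
    show PySem.List.pyGetD row (PySem.Int.floordiv (k : Int) factor) 0 = _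
    rw [hfn, PySem.Int.floordiv_natCast, PySem.List.pyGetD_natCast]

-- ===== VERDICT (by name: the statement is the Claim_ definition above) =====
theorem hupscale_spec : Claim_equal_hupscale := by
  intro grid factor _
  unfold Spec_hupscale hupscale hupscale_alt
  rw [PySem.List.foldl_append_singleton_eq_map]
  simp only [List.nil_append]
  apply List.map_congr_left
  intro row _
  rw [rowA_eq_flatMap, rowB_eq_flatMap]
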